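-- pv_equiv track=rewrite | github.com/Mehwish-Mansoor/Advance-Text-Analyzer | text.py | analyze_paragraph
-- ===== SOURCE A (Python) =====
-- def analyze_paragraph(paragraph):
--     # Convert paragraph to string (demonstrating type casting)
--     text = str(paragraph).strip()
--
--     # Basic counts using string methods
--     letter_count = len(text.replace(" ", ""))
--     words = text.split()
--     word_count = len(words)
--
--     # Calculate average word length (demonstrating float division)
--     avg_word_length = letter_count / word_count if word_count > 0 else 0.0
--
--     # Count uppercase and lowercase
--     uppercase_count = sum(1 for char in text if char.isupper())
--     lowercase_count = sum(1 for char in text if char.islower())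
--
--     digit_count = sum(1 for char in text if char.isdigit())
--     space_count = sum(1 for char in text if char.isspace())
--
--     # Find unique words (demonstrating set data type)
--     unique_words = len(set(word.lower() for word in words))
--
--     # Count sentences (demonstrating string methods)
--     sentences = text.count('.') + text.count('!') + text.count('?')
--     sentences = max(1, sentences) if text else 0
--
--     return {
--         'letter_count': letter_count,
--         'word_count': word_count,
--         'uppercase_count': uppercase_count,
--         'lowercase_count': lowercase_count,
--         'digit_count': digit_count,
--         'space_count': space_count,
--         'unique_words': unique_words,
--         'sentence_count': sentences
--     }
-- ===== SOURCE B (Python) =====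
-- def analyze_paragraph(paragraph):
--     # single aggregating pass over the characters instead of six separate scans
--     text = str(paragraph).strip()
--     letters = upper = lower = digits = spaces = punct = 0
--     for ch in text:
--         if ch != ' ':
--             letters += 1
--         if ch.isupper():
--             upper += 1
--         if ch.islower():
--             lower += 1
--         if ch.isdigit():
--             digits += 1
--         if ch.isspace():
--             spaces += 1
--         if ch in '.!?':
--             punct += 1
--     words = text.split()
--     return {
--         'letter_count': letters,
--         'word_count': len(words),
--         'uppercase_count': upper,
--         'lowercase_count': lower,
--         'digit_count': digits,
--         'space_count': spaces,
--         'unique_words': len({w.lower() for w in words}),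
--         'sentence_count': max(1, punct) if text else 0,
--     }
-- ===== Notes on version B (the rewrite author's own statement) =====
-- stated objective: alternative
-- what changed: Replaces A's six separate scans of the text (replace-based letter count, four generator sums, three substring counts) with one aggregating pass over the characters maintaining six counters.
import Mathlib
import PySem

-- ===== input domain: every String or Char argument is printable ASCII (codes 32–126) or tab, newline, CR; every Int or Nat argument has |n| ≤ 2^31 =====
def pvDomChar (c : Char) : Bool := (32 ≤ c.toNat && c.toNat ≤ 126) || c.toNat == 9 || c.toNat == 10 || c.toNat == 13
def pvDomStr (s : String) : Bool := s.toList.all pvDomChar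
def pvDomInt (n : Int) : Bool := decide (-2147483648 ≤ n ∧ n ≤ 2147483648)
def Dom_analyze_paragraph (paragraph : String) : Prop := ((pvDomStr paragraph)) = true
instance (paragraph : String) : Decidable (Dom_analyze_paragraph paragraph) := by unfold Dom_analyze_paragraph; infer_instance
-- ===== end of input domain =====

-- B replaces A's six separate scans of the text with one aggregating pass over its characters (objective: alternative, same cost).
-- A's avg_word_length is a float that A computes and discards (not returned); both ports omit it, return value is unaffected.

-- ===== PORT A =====
def analyze_paragraph (paragraph : String) : List (String × Int) :=
  let text : List Char := PySem.Chars.strip paragraph.toList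
  let letter_count : Int := ((PySem.Chars.replace text [' '] []).length : Int)
  let words : List (List Char) := PySem.Chars.split₀ text
  let word_count : Int := (words.length : Int)
  let uppercase_count : Int := ((text.filter (fun c => PySem.Chars.isupper c)).map (fun _ => (1 : Int))).sum
  let lowercase_count : Int := ((text.filter (fun c => PySem.Chars.islower c)).map (fun _ => (1 : Int))).sum
  let digit_count : Int := ((text.filter (fun c => PySem.Chars.isdigit c)).map (fun _ => (1 : Int))).sum
  let space_count : Int := ((text.filter (fun c => PySem.Chars.isspace c)).map (fun _ => (1 : Int))).sum
  let unique_words : Int := ((PySem.Set.ofList (words.map PySem.Chars.lower)).length : Int)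
  let sentences : Int := (PySem.Chars.count text ['.'] : Int) + (PySem.Chars.count text ['!'] : Int) + (PySem.Chars.count text ['?'] : Int)
  let sentences : Int := if text ≠ [] then max 1 sentences else 0
  [("letter_count", letter_count), ("word_count", word_count),
   ("uppercase_count", uppercase_count), ("lowercase_count", lowercase_count),
   ("digit_count", digit_count), ("space_count", space_count),
   ("unique_words", unique_words), ("sentence_count", sentences)]

-- ===== PORT B =====
-- the single-pass accumulator: (letters, upper, lower, digits, spaces, punct)
def pvStep (st : Nat × Nat × Nat × Nat × Nat × Nat) (c : Char) : Nat × Nat × Nat × Nat × Nat × Nat :=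
  ((if c != ' ' then st.1 + 1 else st.1),
   (if PySem.Chars.isupper c then st.2.1 + 1 else st.2.1),
   (if PySem.Chars.islower c then st.2.2.1 + 1 else st.2.2.1),
   (if PySem.Chars.isdigit c then st.2.2.2.1 + 1 else st.2.2.2.1),
   (if PySem.Chars.isspace c then st.2.2.2.2.1 + 1 else st.2.2.2.2.1),
   (if PySem.Chars.isIn [c] ['.', '!', '?'] then st.2.2.2.2.2 + 1 else st.2.2.2.2.2))

def analyze_paragraph_alt (paragraph : String) : List (String × Int) :=
  let text : List Char := PySem.Chars.strip paragraph.toList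
  let st := text.foldl pvStep (0, 0, 0, 0, 0, 0)
  let words : List (List Char) := PySem.Chars.split₀ text
  [("letter_count", (st.1 : Int)), ("word_count", (words.length : Int)),
   ("uppercase_count", (st.2.1 : Int)), ("lowercase_count", (st.2.2.1 : Int)),
   ("digit_count", (st.2.2.2.1 : Int)), ("space_count", (st.2.2.2.2.1 : Int)),
   ("unique_words", ((PySem.Set.ofList (words.map PySem.Chars.lower)).length : Int)),
   ("sentence_count", if text ≠ [] then max 1 (st.2.2.2.2.2 : Int) else 0)]

-- ===== PRECONDITION & SPEC =====
def Spec_analyze_paragraph (paragraph : String) (out : List (String × Int)) : Prop := out = analyze_paragraph_alt paragraph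
instance (paragraph : String) (out : List (String × Int)) : Decidable (Spec_analyze_paragraph paragraph out) := by unfold Spec_analyze_paragraph; infer_instance

-- ===== CLAIM (what is proved, stated in full; the proofs are below) =====
def Claim_equal_analyze_paragraph : Prop := ∀ (paragraph : String), Dom_analyze_paragraph paragraph → Spec_analyze_paragraph paragraph (analyze_paragraph paragraph)

-- ===== LEMMAS AND PROOFS =====

theorem pv_replace_go_del (c : Char) : ∀ (fuel : Nat) (l acc : List Char), l.length ≤ fuel →
    PySem.Chars.replace.go [c] [] fuel l acc = acc.reverse ++ l.filter (fun x => x != c) := by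
  intro fuel
  induction fuel with
  | zero => intro l acc h; cases l with
    | nil => simp [PySem.Chars.replace.go]
    | cons a t => simp at h
  | succ n ih =>
    intro l acc h
    cases l with
    | nil => simp [PySem.Chars.replace.go]
    | cons a t =>
      simp only [PySem.Chars.replace.go, List.isPrefixOf]
      by_cases hc : c = a
      · subst hc
        simp only [List.length_cons] at h
        simp [ih t acc (by omega)]
      · rw [if_neg (by simp [hc])]
        simp only [List.length_cons] at h
        rw [ih t (a :: acc) (by omega)]
        simp [Ne.symm hc]

theorem pv_replace_del_len (c : Char) (s : List Char) :
    (PySem.Chars.replace s [c] []).length = s.countP (fun x => x != c) := by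
  simp [PySem.Chars.replace, pv_replace_go_del c s.length s [] le_rfl, List.countP_eq_length_filter]

theorem pv_count_go_single (c : Char) : ∀ (fuel : Nat) (l : List Char) (acc : Nat), l.length ≤ fuel →
    PySem.Chars.count.go [c] fuel l acc = acc + l.count c := by
  intro fuel
  induction fuel with
  | zero => intro l acc h; cases l with
    | nil => simp [PySem.Chars.count.go]
    | cons a t => simp at h
  | succ n ih =>
    intro l acc h
    cases l with
    | nil => simp [PySem.Chars.count.go]
    | cons a t =>
      simp only [PySem.Chars.count.go, List.isPrefixOf]
      simp only [List.length_cons] at h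
      by_cases hc : c = a
      · subst hc; simp [ih t (acc + 1) (by omega)]; omega
      · rw [if_neg (by simp [hc])]
        rw [ih t acc (by omega)]
        simp [Ne.symm hc]

theorem pv_count_single (c : Char) (s : List Char) :
    PySem.Chars.count s [c] = s.count c := by
  simp [PySem.Chars.count, pv_count_go_single c s.length s 0 le_rfl]

theorem pv_isIn_punct (c : Char) :
    PySem.Chars.isIn [c] ['.', '!', '?'] = (c == '.' || c == '!' || c == '?') := by
  simp [PySem.Chars.isIn, PySem.Chars.find, PySem.Chars.find.go, List.isPrefixOf]
  by_cases h1 : c = '.' <;> by_cases h2 : c = '!' <;> by_cases h3 : c = '?' <;> simp_all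

theorem pv_countP_punct (cs : List Char) :
    cs.countP (fun c => PySem.Chars.isIn [c] ['.', '!', '?']) =
      cs.count '.' + cs.count '!' + cs.count '?' := by
  induction cs with
  | nil => simp
  | cons a t ih =>
    rw [List.countP_cons, ih]
    simp only [List.count_cons, pv_isIn_punct]
    by_cases h1 : a = '.' <;> by_cases h2 : a = '!' <;> by_cases h3 : a = '?' <;>
      simp_all <;> omega

theorem pv_fold_spec : ∀ (cs : List Char) (l u lo d sp p : Nat),
    cs.foldl pvStep (l, u, lo, d, sp, p) =
      (l + cs.countP (fun c => c != ' '),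
       u + cs.countP (fun c => PySem.Chars.isupper c),
       lo + cs.countP (fun c => PySem.Chars.islower c),
       d + cs.countP (fun c => PySem.Chars.isdigit c),
       sp + cs.countP (fun c => PySem.Chars.isspace c),
       p + cs.countP (fun c => PySem.Chars.isIn [c] ['.', '!', '?'])) := by
  intro cs
  induction cs with
  | nil => simp
  | cons a t ih =>
    intro l u lo d sp p
    simp only [List.foldl_cons, List.countP_cons, pvStep]
    rw [ih]
    simp only [Prod.mk.injEq]
    split_ifs <;> simp_all <;> omega

theorem pv_sum_filter_ones (q : Char → Bool) (cs : List Char) :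
    ((cs.filter q).map (fun _ => (1 : Int))).sum = (cs.countP q : Int) := by
  simp [List.countP_eq_length_filter]

-- ===== VERDICT (by name: the statement is the Claim_ definition above) =====
theorem analyze_paragraph_spec : Claim_equal_analyze_paragraph := by
  intro paragraph _
  unfold Spec_analyze_paragraph
  simp only [analyze_paragraph, analyze_paragraph_alt]
  rw [pv_fold_spec]
  simp only [pv_replace_del_len, pv_count_single, pv_sum_filter_ones, pv_countP_punct,
    Nat.zero_add, Nat.cast_add]
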